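-- pv_equiv track=rewrite | github.com/GregWatson/AoC | Advent_of_code_2016/Day_7/puzzle.py | get_supers
-- ===== SOURCE A (Python) =====
-- def get_supers(l):
--     supers = []
--     in_super = True
--     s = ''
--     for c in l:
--         if in_super:
--             if c == '[':
--                 supers.append(s)
--                 s = ''
--                 in_super = False
--             else:
--                 s += c
--         else:
--             if c == ']':
--                 in_super = True
--     if len(s):
--         supers.append(s)
--     return supers
-- ===== SOURCE B (Python) =====
-- def get_supers(l):
--     i = l.find('[')
--     if i < 0:
--         return [l] if l else []
--     rest = l[i + 1:]
--     j = rest.find(']')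
--     if j < 0:
--         return [l[:i]]
--     return [l[:i]] + get_supers(rest[j + 1:])
-- ===== Notes on version B (the rewrite author's own statement) =====
-- stated objective: faster
-- what changed: Replaces A's char-by-char Python state machine (in_super flag plus string accumulator built by repeated concatenation) with a recursive decomposition using str.find and slicing: locate the next opening bracket, emit the prefix, skip past the matching closing bracket, recurse on the remainder, so scanning runs in C-level find/slice instead of a per-character interpreter loop.
import Mathlib
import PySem

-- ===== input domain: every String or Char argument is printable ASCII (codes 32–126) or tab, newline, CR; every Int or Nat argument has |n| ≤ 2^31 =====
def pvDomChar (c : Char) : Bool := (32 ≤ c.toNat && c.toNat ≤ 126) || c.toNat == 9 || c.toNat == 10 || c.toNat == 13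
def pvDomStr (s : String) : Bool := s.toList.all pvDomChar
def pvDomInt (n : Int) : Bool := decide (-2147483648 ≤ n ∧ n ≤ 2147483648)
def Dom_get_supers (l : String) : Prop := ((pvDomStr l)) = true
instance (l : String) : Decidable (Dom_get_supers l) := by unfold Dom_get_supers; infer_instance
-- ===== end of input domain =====

-- B replaces A's char-by-char state machine with a recursive find/slice decomposition (measured constant-factor faster in Python; same O(n) asymptotics).


-- ===== PORT A =====
-- for c in l: state (supers, in_super, s)
def pvStepA (st : List String × Bool × List Char) (c : Char) : List String × Bool × List Char :=
  if st.2.1 then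
    if c = '[' then (st.1 ++ [String.ofList st.2.2], false, [])
    else (st.1, true, st.2.2 ++ [c])
  else
    if c = ']' then (st.1, true, st.2.2)
    else st

def get_supers (l : String) : List String :=
  let st := l.toList.foldl pvStepA ([], true, [])
  if st.2.2.length ≠ 0 then st.1 ++ [String.ofList st.2.2] else st.1

-- ===== PORT B =====
-- recursive helper on the code points (Source B recurses on the string itself)
def pvAltGo (cs : List Char) : List String :=
  let i := PySem.Chars.find cs ['[']
  if i < 0 then
    if cs ≠ [] then [String.ofList cs] else []
  else
    let rest := PySem.List.slice cs (some (i + 1)) none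
    let j := PySem.Chars.find rest [']']
    if j < 0 then [String.ofList (PySem.List.slice cs none (some i))]
    else [String.ofList (PySem.List.slice cs none (some i))] ++
         pvAltGo (PySem.List.slice rest (some (j + 1)) none)
  termination_by cs.length
  decreasing_by
    · show (PySem.List.slice rest (some (j + 1)) none).length < cs.length
      have hi : 0 ≤ i := by omega
      have hinf : ['['] <:+: cs := (PySem.Chars.find_nonneg_iff cs ['[']).mp hi
      have hpos : 0 < cs.length := by
        have := hinf.sublist.length_le
        simp at this; omega
      have h1 : rest = cs.drop (i+1).toNat :=
        PySem.List.slice_from cs (by omega : (0:Int) ≤ i + 1)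
      have h2 : PySem.List.slice rest (some (j + 1)) none = rest.drop (j+1).toNat :=
        PySem.List.slice_from rest (by omega : (0:Int) ≤ j + 1)
      have h3 : (PySem.List.slice rest (some (j + 1)) none).length ≤ rest.length := by
        rw [h2]; simp
      have h4 : rest.length < cs.length := by
        rw [h1, List.length_drop]
        have hle : (i+1).toNat ≥ 1 := by omega
        omega
      omega

def get_supers_alt (l : String) : List String := pvAltGo l.toList

-- ===== PRECONDITION & SPEC =====
def Spec_get_supers (l : String) (out : List String) : Prop := out = get_supers_alt l
instance (l : String) (out : List String) : Decidable (Spec_get_supers l out) := by unfold Spec_get_supers; infer_instance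

-- ===== CLAIM (what is proved, stated in full; the proofs are below) =====
def Claim_equal_get_supers : Prop := ∀ (l : String), Dom_get_supers l → Spec_get_supers l (get_supers l)

-- ===== LEMMAS AND PROOFS =====

-- the full A-side computation from a "true" state
def pvFA (cs : List Char) (sup : List String) (s : List Char) : List String :=
  let st := cs.foldl pvStepA (sup, true, s)
  if st.2.2.length ≠ 0 then st.1 ++ [String.ofList st.2.2] else st.1

theorem pvFA_spec (l : String) : get_supers l = pvFA l.toList [] [] := rfl

theorem pvStepA_true (sup : List String) (s : List Char) (c : Char) :
    pvStepA (sup, true, s) c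
      = if c = '[' then (sup ++ [String.ofList s], false, []) else (sup, true, s ++ [c]) := by
  simp [pvStepA]

theorem pvStepA_false (sup : List String) (s : List Char) (c : Char) :
    pvStepA (sup, false, s) c
      = if c = ']' then (sup, true, s) else (sup, false, s) := by
  simp [pvStepA]

theorem foldA_true_noBr (cs : List Char) (h : '[' ∉ cs) (sup : List String) (s : List Char) :
    cs.foldl pvStepA (sup, true, s) = (sup, true, s ++ cs) := by
  induction cs generalizing s with
  | nil => simp
  | cons c cs ih =>
    have hc : c ≠ '[' := fun hc => h (hc ▸ List.mem_cons_self)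
    simp only [List.foldl_cons, pvStepA_true, if_neg hc]
    rw [ih (fun hm => h (List.mem_cons_of_mem _ hm))]
    simp

theorem foldA_true_br (pre : List Char) (h : '[' ∉ pre) (rest : List Char)
    (sup : List String) (s : List Char) :
    (pre ++ '[' :: rest).foldl pvStepA (sup, true, s)
      = rest.foldl pvStepA (sup ++ [String.ofList (s ++ pre)], false, []) := by
  induction pre generalizing s sup with
  | nil => simp [pvStepA]
  | cons c cs ih =>
    have hc : c ≠ '[' := fun hc => h (hc ▸ List.mem_cons_self)
    simp only [List.cons_append, List.foldl_cons, pvStepA_true, if_neg hc]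
    rw [ih (fun hm => h (List.mem_cons_of_mem _ hm))]
    simp

theorem foldA_false_noCl (rest : List Char) (h : ']' ∉ rest) (sup : List String) (s : List Char) :
    rest.foldl pvStepA (sup, false, s) = (sup, false, s) := by
  induction rest with
  | nil => simp
  | cons c cs ih =>
    have hc : c ≠ ']' := fun hc => h (hc ▸ List.mem_cons_self)
    simp only [List.foldl_cons, pvStepA_false, if_neg hc]
    exact ih (fun hm => h (List.mem_cons_of_mem _ hm))

theorem foldA_false_cl (mid : List Char) (h : ']' ∉ mid) (tail : List Char)
    (sup : List String) (s : List Char) :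
    (mid ++ ']' :: tail).foldl pvStepA (sup, false, s) = tail.foldl pvStepA (sup, true, s) := by
  induction mid with
  | nil => simp [pvStepA]
  | cons c cs ih =>
    have hc : c ≠ ']' := fun hc => h (hc ▸ List.mem_cons_self)
    simp only [List.cons_append, List.foldl_cons, pvStepA_false, if_neg hc]
    exact ih (fun hm => h (List.mem_cons_of_mem _ hm))

-- accumulator normalisation
theorem foldA_acc (cs : List Char) (sup : List String) (b : Bool) (s : List Char) :
    cs.foldl pvStepA (sup, b, s)
      = (sup ++ (cs.foldl pvStepA ([], b, s)).1, (cs.foldl pvStepA ([], b, s)).2) := by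
  induction cs generalizing sup b s with
  | nil => simp
  | cons c cs ih =>
    simp only [List.foldl_cons]
    have hstep : pvStepA (sup, b, s) c
        = (sup ++ (pvStepA ([], b, s) c).1, (pvStepA ([], b, s) c).2) := by
      simp only [pvStepA]; split_ifs <;> simp
    rw [hstep, ih]
    have := ih (sup := (pvStepA ([], b, s) c).1) (b := (pvStepA ([], b, s) c).2.1)
      (s := (pvStepA ([], b, s) c).2.2)
    simp at this ⊢
    rw [this]
    simp

theorem pvFA_acc (cs : List Char) (sup : List String) (s : List Char) :
    pvFA cs sup s = sup ++ pvFA cs [] s := by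
  unfold pvFA
  rw [foldA_acc]
  simp only []
  split_ifs <;> simp

-- first occurrence of a single char: decomposition
theorem mem_iff_singleton_infix (ch : Char) (cs : List Char) : ch ∈ cs ↔ [ch] <:+: cs := by
  constructor
  · intro h
    obtain ⟨l1, l2, rfl⟩ := List.append_of_mem h
    exact ⟨l1, l2, by simp⟩
  · rintro ⟨l1, l2, rfl⟩
    simp

theorem find_char_decomp (ch : Char) (cs : List Char)
    (h : ¬ PySem.Chars.find cs [ch] < 0) :
    cs = cs.take (PySem.Chars.find cs [ch]).toNat ++ ch :: cs.drop ((PySem.Chars.find cs [ch]).toNat + 1)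
    ∧ ch ∉ cs.take (PySem.Chars.find cs [ch]).toNat := by
  set i := PySem.Chars.find cs [ch] with hi
  have hnn : 0 ≤ i := by omega
  obtain ⟨hpre, hmin⟩ := PySem.Chars.find_spec (show (0:Int) ≤ PySem.Chars.find cs [ch] from hnn)
  have hhead : (cs.drop i.toNat).head? = some ch := by
    obtain ⟨t, ht⟩ := hpre
    rw [← ht]; rfl
  have hlt : i.toNat < cs.length := by
    by_contra hge
    rw [List.drop_eq_nil_of_le (by omega)] at hhead
    simp at hhead
  constructor
  · conv_lhs => rw [← List.take_append_drop i.toNat cs]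
    congr 1
    rw [List.drop_eq_getElem_cons hlt, ← List.drop_drop]
    congr 1
    have h5 : (List.drop i.toNat cs).head? = cs[i.toNat]? := List.head?_drop
    rw [hhead, List.getElem?_eq_getElem hlt] at h5
    exact (Option.some_injective _ h5.symm)
  · intro hmem
    obtain ⟨j, hj, hget⟩ := List.mem_iff_getElem.mp hmem
    have hjlt : j < i.toNat := by
      have := List.length_take_le i.toNat cs
      omega
    apply hmin j hjlt
    have hjcs : j < cs.length := by omega
    have : cs[j] = ch := by
      rw [List.getElem_take] at hget
      exact hget
    refine ⟨cs.drop (j+1), ?_⟩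
    rw [← this, List.singleton_append]
    exact (List.drop_eq_getElem_cons hjcs).symm

theorem find_char_neg (ch : Char) (cs : List Char)
    (h : PySem.Chars.find cs [ch] < 0) : ch ∉ cs := by
  have hne : PySem.Chars.find cs [ch] = -1 := by
    have := PySem.Chars.neg_one_le_find cs [ch]
    omega
  have := (PySem.Chars.find_eq_neg_one_iff cs [ch]).mp hne
  exact fun hm => this ((mem_iff_singleton_infix ch cs).mp hm)

theorem pvMain (n : Nat) : ∀ cs : List Char, cs.length ≤ n → pvFA cs [] [] = pvAltGo cs := by
  induction n with
  | zero =>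
    intro cs hcs
    have hcz : cs = [] := List.length_eq_zero_iff.mp (by omega)
    subst hcz
    have hf : PySem.Chars.find ([] : List Char) ['['] = -1 :=
      (PySem.Chars.find_eq_neg_one_iff _ _).mpr (by simp)
    rw [pvAltGo, hf]
    simp [pvFA]
  | succ n ih =>
    intro cs hcs
    rw [pvAltGo]
    by_cases hfi : PySem.Chars.find cs ['['] < 0
    · -- no '[': A stays in super state the whole way
      rw [if_pos hfi]
      have hnb := find_char_neg '[' cs hfi
      unfold pvFA
      rw [foldA_true_noBr cs hnb]
      simp only [List.nil_append]
      by_cases hne : cs = []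
      · subst hne; simp
      · have h0 : cs.length ≠ 0 := by simpa using hne
        simp [h0, hne]
    · rw [if_neg hfi]
      set i := PySem.Chars.find cs ['['] with hidef
      have hinn : 0 ≤ i := by omega
      obtain ⟨hdecomp, hnb⟩ := find_char_decomp '[' cs (by omega)
      rw [← hidef] at hdecomp hnb
      have hrest : PySem.List.slice cs (some (i + 1)) none = cs.drop (i.toNat + 1) := by
        rw [PySem.List.slice_from cs (by omega : (0:Int) ≤ i + 1)]
        congr 1
        omega
      have htake : PySem.List.slice cs none (some i) = cs.take i.toNat :=
        PySem.List.slice_to cs hinn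
      set rest := cs.drop (i.toNat + 1) with hrestdef
      have hA1 : pvFA cs [] [] = (let st := rest.foldl pvStepA ([String.ofList (cs.take i.toNat)], false, []);
          if st.2.2.length ≠ 0 then st.1 ++ [String.ofList st.2.2] else st.1) := by
        unfold pvFA
        conv_lhs => rw [hdecomp]
        rw [foldA_true_br _ hnb]
        simp
      by_cases hfj : PySem.Chars.find (PySem.List.slice cs (some (i + 1)) none) [']'] < 0
      · rw [if_pos hfj]
        rw [hrest] at hfj
        have hnc := find_char_neg ']' rest hfj
        rw [hA1]
        rw [foldA_false_noCl rest hnc]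
        simp [htake]
      · rw [if_neg hfj]
        rw [hrest] at hfj ⊢
        set j := PySem.Chars.find rest [']'] with hjdef
        have hjnn : 0 ≤ j := by omega
        obtain ⟨hdecomp2, hnc⟩ := find_char_decomp ']' rest (by omega)
        rw [← hjdef] at hdecomp2 hnc
        have htail : PySem.List.slice rest (some (j + 1)) none = rest.drop (j.toNat + 1) := by
          rw [PySem.List.slice_from rest (by omega : (0:Int) ≤ j + 1)]
          congr 1
          omega
        set tail := rest.drop (j.toNat + 1) with htaildef
        have hlen : tail.length ≤ n := by
          have h1 : i.toNat < cs.length := by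
            by_contra hge
            have : rest = [] := by
              rw [hrestdef]; exact List.drop_eq_nil_of_le (by omega)
            rw [this] at hdecomp2
            exact absurd hdecomp2 (by simp)
          have h2 : rest.length ≤ cs.length - (i.toNat + 1) := by
            rw [hrestdef]; simp
          have h3 : tail.length ≤ rest.length := by
            rw [htaildef]; simp
          omega
        rw [hA1]
        conv_lhs => rw [hdecomp2]
        rw [foldA_false_cl _ hnc]
        show pvFA tail [String.ofList (List.take i.toNat cs)] [] = _
        rw [pvFA_acc, ih tail hlen, htake, htail]

-- ===== VERDICT (by name: the statement is the Claim_ definition above) =====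
theorem get_supers_spec : Claim_equal_get_supers := by
  intro l _
  unfold Spec_get_supers get_supers_alt
  rw [pvFA_spec]
  exact pvMain l.toList.length l.toList le_rfl
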